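-- pv_equiv track=rewrite | github.com/hareshaprajapati/langgraph-agentic-ai | V6_9_5/Siko_Core.py | _is_adjacent_shape_3
-- ===== SOURCE A (Python) =====
-- def _is_adjacent_shape_3(a, b):
--     if sum(a) != sum(b):
--         return False
--     diffs = [abs(a[i] - b[i]) for i in range(3)]
--     if max(diffs) > 1:
--         return False
--     if sum(diffs) == 0:
--         return True
--     return sum(diffs) == 2 and diffs.count(1) == 2 and diffs.count(0) == 1
-- ===== SOURCE B (Python) =====
-- def _is_adjacent_shape_3(a, b):
--     if sum(a) != sum(b):
--         return False
--     ta, tb = list(a[:3]), list(b[:3])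
--     if ta == tb:
--         return True
--     for i in range(3):
--         for j in range(i + 1, 3):
--             for si in (1, -1):
--                 for sj in (1, -1):
--                     cand = list(ta)
--                     cand[i] += si
--                     cand[j] += sj
--                     if cand == tb:
--                         return True
--     return False
-- ===== Notes on version B (the rewrite author's own statement) =====
-- stated objective: alternative
-- what changed: Instead of analysing the vector of absolute component differences (max/sum/count), B generates every candidate neighbour of a's triple by perturbing two distinct coordinates by +-1 and tests whether b's triple is the unchanged triple or one of the candidates.
import Mathlib
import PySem

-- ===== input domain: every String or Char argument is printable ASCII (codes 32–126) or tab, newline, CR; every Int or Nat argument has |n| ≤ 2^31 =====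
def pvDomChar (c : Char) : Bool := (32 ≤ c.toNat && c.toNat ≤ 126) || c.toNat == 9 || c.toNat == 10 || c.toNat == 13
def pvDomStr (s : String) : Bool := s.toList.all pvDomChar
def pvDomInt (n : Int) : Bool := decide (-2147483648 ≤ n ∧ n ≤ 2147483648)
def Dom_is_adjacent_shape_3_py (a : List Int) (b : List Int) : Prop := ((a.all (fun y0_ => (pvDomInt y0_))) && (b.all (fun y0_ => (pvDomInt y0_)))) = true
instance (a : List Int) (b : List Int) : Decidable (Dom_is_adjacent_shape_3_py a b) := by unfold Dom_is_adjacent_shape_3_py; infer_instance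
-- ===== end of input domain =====

-- B replaces A's diff-vector analysis by generate-and-test: it enumerates every
-- ±1 two-coordinate perturbation of a's triple and tests b against the candidates;
-- objective: alternative (same O(1) cost, different strategy).

-- ===== PORT A =====
def is_adjacent_shape_3_py (a : List Int) (b : List Int) : Bool :=
  if a.sum ≠ b.sum then false
  else
    let diffs := (PySem.List.pyRange 0 3 1).map
      (fun i => |PySem.List.pyGetD a i 0 - PySem.List.pyGetD b i 0|)
    if (PySem.List.max? diffs (fun x => x)).getD 0 > 1 then false
    else if diffs.sum = 0 then true
    else decide (diffs.sum = 2 ∧ diffs.count 1 = 2 ∧ diffs.count 0 = 1)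

-- ===== PORT B =====
def is_adjacent_shape_3_py_alt (a : List Int) (b : List Int) : Bool :=
  if a.sum ≠ b.sum then false
  else
    let ta := PySem.List.slice a none (some 3)
    let tb := PySem.List.slice b none (some 3)
    if ta = tb then true
    else
      -- the early-return nested 'for' loops become nested '.any'
      (PySem.List.pyRange 0 3 1).any fun i =>
        (PySem.List.pyRange (i + 1) 3 1).any fun j =>
          ([1, -1] : List Int).any fun si =>
            ([1, -1] : List Int).any fun sj =>
              let cand := PySem.List.pySetD ta i (PySem.List.pyGetD ta i 0 + si)
              let cand := PySem.List.pySetD cand j (PySem.List.pyGetD cand j 0 + sj)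
              cand = tb

-- ===== PRECONDITION & SPEC =====
-- Pre_ excludes exactly the inputs on which A raises IndexError: equal sums with
-- fewer than 3 elements in a or b.
def Pre_is_adjacent_shape_3_py (a : List Int) (b : List Int) : Prop :=
  a.sum = b.sum → (3 ≤ a.length ∧ 3 ≤ b.length)
instance (a : List Int) (b : List Int) : Decidable (Pre_is_adjacent_shape_3_py a b) := by
  unfold Pre_is_adjacent_shape_3_py; infer_instance
def pvWitness_is_adjacent_shape_3_py : List Int × List Int := ([1, 2, 3], [2, 1, 3])

def Spec_is_adjacent_shape_3_py (a : List Int) (b : List Int) (out : Bool) : Prop := out = is_adjacent_shape_3_py_alt a b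
instance (a : List Int) (b : List Int) (out : Bool) : Decidable (Spec_is_adjacent_shape_3_py a b out) := by unfold Spec_is_adjacent_shape_3_py; infer_instance

-- ===== CLAIM (what is proved, stated in full; the proofs are below) =====
def Claim_equal_is_adjacent_shape_3_py : Prop := ∀ (a : List Int) (b : List Int), Dom_is_adjacent_shape_3_py a b → Pre_is_adjacent_shape_3_py a b → Spec_is_adjacent_shape_3_py a b (is_adjacent_shape_3_py a b)

-- ===== LEMMAS AND PROOFS =====
set_option maxHeartbeats 2000000

theorem three_le_split (xs : List Int) (h : 3 ≤ xs.length) :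
    ∃ x y z r, xs = x :: y :: z :: r := by
  rcases xs with _ | ⟨x, _ | ⟨y, _ | ⟨z, r⟩⟩⟩
  · simp at h
  · simp at h
  · simp at h
  · exact ⟨x, y, z, r, rfl⟩

theorem count_char (d0 d1 d2 : Int) :
    (([d0,d1,d2] : List Int).count 1 = 2 ∧ ([d0,d1,d2] : List Int).count 0 = 1) ↔
    ((d0=0∧d1=1∧d2=1) ∨ (d0=1∧d1=0∧d2=1) ∨ (d0=1∧d1=1∧d2=0)) := by
  simp only [List.count_cons, List.count_nil, beq_iff_eq]
  split_ifs <;> omega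

theorem adj3_core (x0 x1 x2 y0 y1 y2 : Int) :
    (if (PySem.List.max? [|x0-y0|, |x1-y1|, |x2-y2|] (fun x => x)).getD 0 > 1 then false
     else if ([|x0-y0|, |x1-y1|, |x2-y2|] : List Int).sum = 0 then true
     else decide (([|x0-y0|, |x1-y1|, |x2-y2|] : List Int).sum = 2 ∧
        ([|x0-y0|, |x1-y1|, |x2-y2|] : List Int).count 1 = 2 ∧
        ([|x0-y0|, |x1-y1|, |x2-y2|] : List Int).count 0 = 1))
    =
    (if ([x0, x1, x2] : List Int) = [y0, y1, y2] then true
     else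
      ([0, 1, 2] : List Int).any fun i =>
        (PySem.List.pyRange (i + 1) 3 1).any fun j =>
          ([1, -1] : List Int).any fun si =>
            ([1, -1] : List Int).any fun sj =>
              let cand := PySem.List.pySetD ([x0, x1, x2] : List Int) i
                (PySem.List.pyGetD ([x0, x1, x2] : List Int) i 0 + si)
              let cand := PySem.List.pySetD cand j (PySem.List.pyGetD cand j 0 + sj)
              cand = [y0, y1, y2]) := by
  have hmax : (PySem.List.max? [|x0 - y0|, |x1 - y1|, |x2 - y2|] (fun x => x)).getD 0
      = max (max |x0 - y0| |x1 - y1|) |x2 - y2| := by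
    rw [PySem.List.max?_id_cons]; rfl
  have hr1 : PySem.List.pyRange (0 + 1) 3 1 = [1, 2] := by decide
  have hr2 : PySem.List.pyRange (1 + 1) 3 1 = [2] := by decide
  have hr3 : PySem.List.pyRange (2 + 1) 3 1 = [] := by decide
  rw [hmax]
  simp only [List.any_cons, List.any_nil, hr1, hr2, hr3]
  simp only [pysem, List.sum_cons, List.sum_nil, add_zero]
  simp only [PySem.List.pySetD_of_nonneg _ _ (by norm_num : (0:Int) ≤ 0),
    PySem.List.pySetD_of_nonneg _ _ (by norm_num : (0:Int) ≤ 1),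
    PySem.List.pySetD_of_nonneg _ _ (by norm_num : (0:Int) ≤ 2)]
  norm_num [List.getD, List.set, show Int.toNat 2 = 2 from rfl]
  rw [Bool.eq_iff_iff]
  simp only [Bool.and_eq_true, Bool.or_eq_true, Bool.not_eq_true', decide_eq_true_eq,
    decide_eq_false_iff_not, not_lt]
  rw [count_char]
  have e0a : (x0 = y0) ↔ (x0 - y0 = 0) := by omega
  have e0b : (x0 + 1 = y0) ↔ (x0 - y0 = -1) := by omega
  have e0c : (x0 + -1 = y0) ↔ (x0 - y0 = 1) := by omega
  have e1a : (x1 = y1) ↔ (x1 - y1 = 0) := by omega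
  have e1b : (x1 + 1 = y1) ↔ (x1 - y1 = -1) := by omega
  have e1c : (x1 + -1 = y1) ↔ (x1 - y1 = 1) := by omega
  have e2a : (x2 = y2) ↔ (x2 - y2 = 0) := by omega
  have e2b : (x2 + 1 = y2) ↔ (x2 - y2 = -1) := by omega
  have e2c : (x2 + -1 = y2) ↔ (x2 - y2 = 1) := by omega
  rw [e0a, e0b, e0c, e1a, e1b, e1c, e2a, e2b, e2c]
  clear hmax hr1 hr2 hr3 e0a e0b e0c e1a e1b e1c e2a e2b e2c
  generalize x0 - y0 = d0
  generalize x1 - y1 = d1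
  generalize x2 - y2 = d2
  constructor
  · rintro ⟨⟨c0, c1, c2⟩, hrest⟩
    obtain ⟨l0, u0⟩ := abs_le.mp c0
    obtain ⟨l1, u1⟩ := abs_le.mp c1
    obtain ⟨l2, u2⟩ := abs_le.mp c2
    interval_cases d0 <;> interval_cases d1 <;> interval_cases d2 <;>
      revert hrest <;> decide
  · intro h
    have p0 : d0 = 0 ∨ d0 = -1 ∨ d0 = 1 := by tauto
    have p1 : d1 = 0 ∨ d1 = -1 ∨ d1 = 1 := by tauto
    have p2 : d2 = 0 ∨ d2 = -1 ∨ d2 = 1 := by tauto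
    rcases p0 with rfl | rfl | rfl <;> rcases p1 with rfl | rfl | rfl <;>
      rcases p2 with rfl | rfl | rfl <;> revert h <;> decide

theorem adj3_equal (a b : List Int) (_hDom : Dom_is_adjacent_shape_3_py a b)
    (hPre : Pre_is_adjacent_shape_3_py a b) :
    Spec_is_adjacent_shape_3_py a b (is_adjacent_shape_3_py a b) := by
  unfold Spec_is_adjacent_shape_3_py is_adjacent_shape_3_py is_adjacent_shape_3_py_alt
  by_cases hs : a.sum = b.sum
  · obtain ⟨ha3, hb3⟩ := hPre hs
    obtain ⟨x0, x1, x2, ar, rfl⟩ := three_le_split a ha3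
    obtain ⟨y0, y1, y2, br, rfl⟩ := three_le_split b hb3
    have hsla : PySem.List.slice (x0 :: x1 :: x2 :: ar) none (some 3) = [x0, x1, x2] := by
      rw [PySem.List.slice_to _ (by norm_num)]; rfl
    have hslb : PySem.List.slice (y0 :: y1 :: y2 :: br) none (some 3) = [y0, y1, y2] := by
      rw [PySem.List.slice_to _ (by norm_num)]; rfl
    have hr : PySem.List.pyRange 0 3 1 = [0, 1, 2] := by decide
    have g1 : PySem.List.pyGetD (x0 :: x1 :: x2 :: ar) 0 0 = x0 := by simp [pysem]
    have g2 : PySem.List.pyGetD (x0 :: x1 :: x2 :: ar) 1 0 = x1 := by simp [pysem]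
    have g3 : PySem.List.pyGetD (x0 :: x1 :: x2 :: ar) 2 0 = x2 := by simp [pysem]
    have g4 : PySem.List.pyGetD (y0 :: y1 :: y2 :: br) 0 0 = y0 := by simp [pysem]
    have g5 : PySem.List.pyGetD (y0 :: y1 :: y2 :: br) 1 0 = y1 := by simp [pysem]
    have g6 : PySem.List.pyGetD (y0 :: y1 :: y2 :: br) 2 0 = y2 := by simp [pysem]
    simp only [hs, ne_eq, not_true_eq_false, if_false, hsla, hslb, hr, List.map,
      g1, g2, g3, g4, g5, g6]
    exact adj3_core x0 x1 x2 y0 y1 y2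
  · simp [hs]

-- ===== VERDICT (by name: the statement is the Claim_ definition above) =====
theorem is_adjacent_shape_3_py_spec : Claim_equal_is_adjacent_shape_3_py :=
  fun a b hDom hPre => adj3_equal a b hDom hPre
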